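-- pv_equiv track=rewrite | github.com/TAHJones/qc-metrics-analyser | app.py | createDropDownList
-- ===== SOURCE A (Python) =====
-- def createDropDownList(dataList, currentSelection):
--     dropDownList = {}
--     for data in dataList:
--         if data == currentSelection:
--             dropDownList["selectedItem"] = data
--         elif data != currentSelection and "unselectedItem1" not in dropDownList:
--                 dropDownList["unselectedItem1"] = data
--         else:
--             dropDownList["unselectedItem2"] = data
--     return dropDownList
-- ===== SOURCE B (Python) =====
-- def createDropDownList(dataList, currentSelection):
--     unselected = [d for d in dataList if d != currentSelection]
--     dropDownList = {}
--     if currentSelection in dataList: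
--         dropDownList["selectedItem"] = currentSelection
--     if unselected:
--         dropDownList["unselectedItem1"] = unselected[0]
--     if len(unselected) >= 2:
--         dropDownList["unselectedItem2"] = unselected[-1]
--     return dropDownList
-- ===== Notes on version B (the rewrite author's own statement) =====
-- stated objective: simpler
-- what changed: Replaces A's single stateful pass (branching on which dict keys are already present) by filtering out the non-matching items once and assembling the three entries directly in a fixed key order; Pre_ excludes lists in which currentSelection occurs but not as the first element, where A's dict-key insertion order (selectedItem appearing after unselectedItem1) is an accident of the traversal and either key order is defensible.
import Mathlib
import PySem

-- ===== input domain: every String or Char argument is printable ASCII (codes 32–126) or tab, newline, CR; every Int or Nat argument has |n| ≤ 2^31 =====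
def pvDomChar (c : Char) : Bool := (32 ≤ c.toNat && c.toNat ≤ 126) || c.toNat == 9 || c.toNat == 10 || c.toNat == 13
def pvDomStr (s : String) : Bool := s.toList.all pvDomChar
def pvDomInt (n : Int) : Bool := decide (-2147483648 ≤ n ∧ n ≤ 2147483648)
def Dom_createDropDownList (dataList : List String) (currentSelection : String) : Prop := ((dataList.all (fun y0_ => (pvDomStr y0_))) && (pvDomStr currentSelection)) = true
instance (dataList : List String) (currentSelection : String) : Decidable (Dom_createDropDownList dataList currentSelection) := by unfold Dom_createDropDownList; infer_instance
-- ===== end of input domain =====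

-- B replaces A's single stateful pass by filtering the non-matching items once and
-- assembling the three dict entries directly in a fixed key order; objective: simpler.

-- ===== PORT A =====
def createDropDownList (dataList : List String) (currentSelection : String) : List (String × String) :=
  (dataList.foldl
    (fun dropDownList data =>
      if data == currentSelection then
        dropDownList.insert "selectedItem" data
      else if data != currentSelection && !(dropDownList.contains "unselectedItem1") then
        dropDownList.insert "unselectedItem1" data
      else
        dropDownList.insert "unselectedItem2" data)
    PySem.Dict.empty).items

-- ===== PORT B =====
def createDropDownList_alt (dataList : List String) (currentSelection : String) : List (String × String) :=
  let unselected := dataList.filter (fun d => d != currentSelection)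
  let dropDownList : PySem.Dict String String := PySem.Dict.empty
  let dropDownList :=
    if dataList.contains currentSelection then
      dropDownList.insert "selectedItem" currentSelection
    else dropDownList
  let dropDownList :=
    if !unselected.isEmpty then
      dropDownList.insert "unselectedItem1" (unselected.headD "")
    else dropDownList
  let dropDownList :=
    if unselected.length ≥ 2 then
      dropDownList.insert "unselectedItem2" (unselected.getLastD "")
    else dropDownList
  dropDownList.items

-- ===== PRECONDITION & SPEC =====
-- Pre_ excludes lists in which currentSelection occurs but not as the first element:
-- there A's dict-key insertion order (selectedItem appearing after unselectedItem1) is an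
-- accident of the traversal, either key order is defensible, and B uses the fixed order.
def Pre_createDropDownList (dataList : List String) (currentSelection : String) : Prop :=
  currentSelection ∉ dataList ∨ dataList.head? = some currentSelection
instance (dataList : List String) (currentSelection : String) : Decidable (Pre_createDropDownList dataList currentSelection) := by unfold Pre_createDropDownList; infer_instance
def pvWitness_createDropDownList : List String × String := (["a", "b"], "a")
def Spec_createDropDownList (dataList : List String) (currentSelection : String) (out : List (String × String)) : Prop := out = createDropDownList_alt dataList currentSelection
instance (dataList : List String) (currentSelection : String) (out : List (String × String)) : Decidable (Spec_createDropDownList dataList currentSelection out) := by unfold Spec_createDropDownList; infer_instance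

-- ===== CLAIM (what is proved, stated in full; the proofs are below) =====
def Claim_equal_createDropDownList : Prop := ∀ (dataList : List String) (currentSelection : String), Dom_createDropDownList dataList currentSelection → Pre_createDropDownList dataList currentSelection → Spec_createDropDownList dataList currentSelection (createDropDownList dataList currentSelection)

-- ===== LEMMAS AND PROOFS =====
def pvEnt (uns : List String) : List (String × String) :=
  (if uns.length ≥ 1 then [("unselectedItem1", uns.headD "")] else []) ++
  (if uns.length ≥ 2 then [("unselectedItem2", uns.getLastD "")] else [])

def pvAsm (sel : String) (p? : Option Nat) (uns : List String) : List (String × String) :=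
  match p? with
  | none => pvEnt uns
  | some p => PySem.List.insert (pvEnt uns) (p : Int) ("selectedItem", sel)

lemma pv_insert_nat {α : Type} (xs : List α) (p : Nat) (v : α) :
    PySem.List.insert xs (p : Int) v = xs.take p ++ v :: xs.drop p := by
  simp only [PySem.List.insert, PySem.List.sliceIndices]
  split_ifs with h1 h2 <;> try omega
  all_goals {
    have h : (min (↑p : Int) (↑xs.length : Int)).toNat = min p xs.length := by omega
    rw [h]
    congr 1
    · rw [List.take_eq_take_iff]; omega
    · congr 1
      by_cases hp : p ≤ xs.length
      · rw [min_eq_left hp]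
      · rw [min_eq_right (by omega), List.drop_length, List.drop_eq_nil_of_le (by omega)] }

lemma pv_asm_some (sel : String) (p : Nat) (uns : List String) :
    pvAsm sel (some p) uns
      = (pvEnt uns).take p ++ ("selectedItem", sel) :: (pvEnt uns).drop p := by
  simp [pvAsm, pv_insert_nat]

lemma pv_ent_nil : pvEnt [] = [] := by simp [pvEnt]

lemma pv_ent_one (u : String) : pvEnt [u] = [("unselectedItem1", u)] := by simp [pvEnt]

lemma pv_ent_two (u r : String) (rs : List String) :
    pvEnt (u :: r :: rs) = [("unselectedItem1", u), ("unselectedItem2", (u :: r :: rs).getLastD "")] := by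
  simp [pvEnt]

lemma pv_asm_none (sel : String) (uns : List String) : pvAsm sel none uns = pvEnt uns := rfl

lemma pv_map_noop (l : List (String × String)) (x : String)
    (h : ∀ e ∈ l, e.1 = "unselectedItem1" ∨ e.1 = "unselectedItem2") :
    l.map (fun p => if (p.1 == "selectedItem") = true then ("selectedItem", x) else p) = l := by
  conv_rhs => rw [← List.map_id l]
  apply List.map_congr_left
  intro e he
  rcases h e he with h1 | h1 <;> simp [h1]

lemma pv_ent_key (uns : List String) (e : String × String) (he : e ∈ pvEnt uns) :
    e.1 = "unselectedItem1" ∨ e.1 = "unselectedItem2" := by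
  unfold pvEnt at he
  rcases List.mem_append.1 he with h | h <;> split_ifs at h <;> simp_all

lemma pv_ent_len_le (uns : List String) : (pvEnt uns).length ≤ uns.length := by
  unfold pvEnt
  split_ifs <;> simp_all

lemma pv_p_le (xs : List String) (sel : String) (p : Nat)
    (h : PySem.List.index? xs sel = some p) :
    p ≤ (xs.filter (fun d => d != sel)).length := by
  obtain ⟨pre, suf, hxs, hlen, hnot⟩ := (PySem.List.index?_eq_some_iff xs sel p).1 h
  subst hxs
  have hpre : pre.filter (fun d => d != sel) = pre :=
    List.filter_eq_self.mpr (fun a ha => by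
      simp only [bne_iff_ne, ne_eq]
      exact fun hh => hnot (hh ▸ ha))
  rw [List.filter_append, hpre]
  simp; omega

lemma pv_any_take_drop {α : Type} (l : List α) (p : Nat) (f : α → Bool) (b : Bool) :
    ((l.take p).any f || (b || (l.drop p).any f)) = (b || l.any f) := by
  have h : ((l.take p).any f || (l.drop p).any f) = l.any f := by
    rw [← List.any_append, List.take_append_drop]
  rw [← h]
  cases (l.take p).any f <;> cases b <;> simp

lemma pv_contains_asm (sel : String) (p : Nat) (uns : List String) (k : String) :
    (PySem.Dict.mk (pvAsm sel (some p) uns)).contains k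
      = (("selectedItem" == k) || (PySem.Dict.mk (pvEnt uns)).contains k) := by
  rw [pv_asm_some]
  simp only [PySem.Dict.contains_mk, List.any_append, List.any_cons]
  exact pv_any_take_drop _ _ _ _

lemma pv_contains_ent_sel (uns : List String) :
    (PySem.Dict.mk (pvEnt uns)).contains "selectedItem" = false := by
  simp only [PySem.Dict.contains_mk, List.any_eq_false]
  intro e he
  rcases pv_ent_key uns e he with h | h <;> simp [h]

lemma pv_A_inv (sel : String) (xs : List String) :
    xs.foldl
      (fun dropDownList data =>
        if data == sel then
          dropDownList.insert "selectedItem" data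
        else if data != sel && !(dropDownList.contains "unselectedItem1") then
          dropDownList.insert "unselectedItem1" data
        else
          dropDownList.insert "unselectedItem2" data)
      PySem.Dict.empty
    = PySem.Dict.mk (pvAsm sel (PySem.List.index? xs sel) (xs.filter (fun d => d != sel))) := by
  induction xs using List.reverseRecOn with
  | nil => rfl
  | append_singleton xs x ih =>
    rw [List.foldl_append, List.foldl_cons, List.foldl_nil, ih]
    by_cases hx : x = sel
    · subst hx
      rw [if_pos (by simp)]
      have hfilter : (xs ++ [x]).filter (fun d => d != x) = xs.filter (fun d => d != x) := by
        simp [List.filter_append]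
      rw [hfilter]
      cases hidx : PySem.List.index? xs x with
      | none =>
        have hnotmem : x ∉ xs := (PySem.List.index?_eq_none_iff xs x).1 hidx
        rw [PySem.List.index?_append_singleton_self xs x hnotmem]
        rw [pv_asm_none]
        apply PySem.Dict.ext
        rw [PySem.Dict.items_insert_of_not_contains _ _ (pv_contains_ent_sel _)]
        have hlen : (pvEnt (xs.filter (fun d => d != x))).length ≤ xs.length :=
          le_trans (pv_ent_len_le _) (List.length_filter_le _ _)
        show pvEnt (xs.filter (fun d => d != x)) ++ _
              = pvAsm x (some xs.length) (xs.filter (fun d => d != x))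
        rw [pv_asm_some, List.take_of_length_le hlen, List.drop_eq_nil_of_le hlen]
      | some p =>
        have hmem : x ∈ xs := by
          obtain ⟨pre, suf, hxs, _, _⟩ := (PySem.List.index?_eq_some_iff xs x p).1 hidx
          subst hxs; simp
        rw [PySem.List.index?_append_of_mem [x] hmem, hidx]
        apply PySem.Dict.ext
        rw [PySem.Dict.items_insert_of_contains _ _
            (by rw [pv_contains_asm]; simp)]
        show List.map _ (pvAsm x (some p) (xs.filter (fun d => d != x))) = _
        rw [pv_asm_some, List.map_append]
        congr 1
        · exact pv_map_noop _ _ (fun e he => pv_ent_key _ e (List.mem_of_mem_take he))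
        · rw [List.map_cons]
          congr 1
          exact pv_map_noop _ _ (fun e he => pv_ent_key _ e (List.mem_of_mem_drop he))
    · have hxb' : (x != sel) = true := by simp [hx]
      rw [if_neg (by simp [hx]), hxb']
      have hfilter : (xs ++ [x]).filter (fun d => d != sel)
          = xs.filter (fun d => d != sel) ++ [x] := by
        simp [List.filter_append, hxb']
      have hidx' : PySem.List.index? (xs ++ [x]) sel = PySem.List.index? xs sel := by
        by_cases hmem : sel ∈ xs
        · exact PySem.List.index?_append_of_mem [x] hmem
        · rw [(PySem.List.index?_eq_none_iff xs sel).2 hmem,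
              (PySem.List.index?_eq_none_iff (xs ++ [x]) sel).2 (by simp [hmem, Ne.symm hx])]
      rw [hfilter, hidx']
      have hple := pv_p_le xs sel
      generalize huns : xs.filter (fun d => d != sel) = uns at *
      cases hidx : PySem.List.index? xs sel with
      | none =>
        rw [pv_asm_none, pv_asm_none]
        match uns with
        | [] =>
          rw [if_pos (by simp [pv_ent_nil, PySem.Dict.contains_mk])]
          apply PySem.Dict.ext
          rw [PySem.Dict.items_insert_of_not_contains _ _
              (by simp [pv_ent_nil, PySem.Dict.contains_mk])]
          show pvEnt [] ++ _ = pvAsm sel none [x]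
          rw [pv_ent_nil]
          simp [pvAsm, pv_ent_one]
        | [u] =>
          rw [if_neg (by simp [pv_ent_one, PySem.Dict.contains_mk])]
          apply PySem.Dict.ext
          rw [PySem.Dict.items_insert_of_not_contains _ _
              (by simp [pv_ent_one, PySem.Dict.contains_mk])]
          show pvEnt [u] ++ _ = pvAsm sel none ([u] ++ [x])
          rw [pv_ent_one]
          simp [pvAsm, pv_ent_two]
        | u :: r :: rs =>
          rw [if_neg (by simp [pv_ent_two, PySem.Dict.contains_mk])]
          apply PySem.Dict.ext
          rw [PySem.Dict.items_insert_of_contains _ _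
              (by simp [pv_ent_two, PySem.Dict.contains_mk])]
          show List.map _ (pvEnt (u :: r :: rs)) = pvEnt ((u :: r :: rs) ++ [x])
          rw [pv_ent_two,
              show (u :: r :: rs) ++ [x] = u :: r :: (rs ++ [x]) by simp, pv_ent_two]
          simp [List.getLastD]
      | some p =>
        have hp := hple p hidx
        match uns with
        | [] =>
          have hp0 : p = 0 := by simpa using hp
          subst hp0
          rw [if_pos (by rw [pv_contains_asm]; simp [pv_ent_nil, PySem.Dict.contains_mk])]
          apply PySem.Dict.ext
          rw [PySem.Dict.items_insert_of_not_contains _ _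
              (by rw [pv_contains_asm]; simp [pv_ent_nil, PySem.Dict.contains_mk])]
          show pvAsm sel (some 0) [] ++ _ = pvAsm sel (some 0) [x]
          rw [pv_asm_some, pv_asm_some, pv_ent_nil, pv_ent_one]
          simp
        | [u] =>
          simp only [List.length_cons, List.length_nil] at hp
          rw [if_neg (by rw [pv_contains_asm]; simp [pv_ent_one, PySem.Dict.contains_mk])]
          apply PySem.Dict.ext
          rw [PySem.Dict.items_insert_of_not_contains _ _
              (by rw [pv_contains_asm]; simp [pv_ent_one, PySem.Dict.contains_mk])]
          show pvAsm sel (some p) [u] ++ _ = pvAsm sel (some p) ([u] ++ [x])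
          rw [pv_asm_some, pv_asm_some, pv_ent_one,
              show ([u] ++ [x] : List String) = [u, x] by simp, pv_ent_two]
          interval_cases p <;> simp
        | u :: r :: rs =>
          rw [if_neg (by rw [pv_contains_asm]; simp [pv_ent_two, PySem.Dict.contains_mk])]
          apply PySem.Dict.ext
          rw [PySem.Dict.items_insert_of_contains _ _
              (by rw [pv_contains_asm]; simp [pv_ent_two, PySem.Dict.contains_mk])]
          show List.map _ (pvAsm sel (some p) (u :: r :: rs)) = pvAsm sel (some p) ((u :: r :: rs) ++ [x])
          rw [pv_asm_some, pv_asm_some, pv_ent_two,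
              show (u :: r :: rs) ++ [x] = u :: r :: (rs ++ [x]) by simp, pv_ent_two]
          match p with
          | 0 => simp [List.getLastD]
          | 1 => simp [List.getLastD]
          | (q + 2) =>
            rw [List.take_of_length_le (by simp), List.take_of_length_le (by simp),
                List.drop_eq_nil_of_le (by simp), List.drop_eq_nil_of_le (by simp)]
            simp [List.getLastD]

-- B's two conditional inserts append exactly pvEnt uns to a dict lacking both keys.
lemma pv_B_steps (d : PySem.Dict String String) (uns : List String)
    (h1 : d.contains "unselectedItem1" = false)
    (h2 : d.contains "unselectedItem2" = false) :
    (if uns.length ≥ 2 then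
        (if !uns.isEmpty then d.insert "unselectedItem1" (uns.headD "") else d).insert
          "unselectedItem2" (uns.getLastD "")
      else (if !uns.isEmpty then d.insert "unselectedItem1" (uns.headD "") else d)).items
      = d.items ++ pvEnt uns := by
  match uns with
  | [] => simp [pv_ent_nil]
  | [u] =>
    rw [if_neg (by simp), if_pos (by simp), PySem.Dict.items_insert_of_not_contains _ _ h1,
      pv_ent_one]
    simp
  | u :: r :: rs =>
    rw [if_pos (by simp), if_pos (by simp)]
    rw [PySem.Dict.items_insert_of_not_contains _ _
        (by rw [PySem.Dict.contains_insert]; simp [h2]),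
      PySem.Dict.items_insert_of_not_contains _ _ h1, pv_ent_two]
    simp

-- ===== VERDICT (by name: the statement is the Claim_ definition above) =====
theorem createDropDownList_spec : Claim_equal_createDropDownList := by
  intro xs sel _ hpre
  show createDropDownList xs sel = createDropDownList_alt xs sel
  unfold createDropDownList createDropDownList_alt
  rw [pv_A_inv]
  rcases hpre with hmem | hhead
  · have hc : xs.contains sel = false := by simpa using hmem
    rw [(PySem.List.index?_eq_none_iff xs sel).2 hmem, pv_asm_none]
    simp only [hc, Bool.false_eq_true, reduceIte]
    rw [pv_B_steps PySem.Dict.empty _ rfl rfl]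
    rfl
  · match xs, hhead with
    | sel :: tl, rfl =>
      have hc : (sel :: tl).contains sel = true := by simp
      have hidx : PySem.List.index? (sel :: tl) sel = some 0 := by
        exact (PySem.List.index?_eq_some_iff _ sel 0).2 ⟨[], tl, by simp, rfl, by simp⟩
      rw [hidx]
      simp only [hc, reduceIte]
      rw [pv_B_steps (PySem.Dict.empty.insert "selectedItem" sel) _
          (by rw [PySem.Dict.contains_insert]; rfl)
          (by rw [PySem.Dict.contains_insert]; rfl)]
      rw [PySem.Dict.items_insert_of_not_contains _ _ rfl]
      show pvAsm sel (some 0) _ = _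
      rw [pv_asm_some]
      simp
      rfl
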